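-- pv_equiv track=rewrite | github.com/apri-me/crs_calculator | crs_calculator.py | cal_olp_psd_points
-- ===== SOURCE A (Python) =====
-- def cal_olp_psd_points(psd, clb):
--     for c in clb:
--         if c in ["Less than CLB 4", "CLB 4 or 5", "CLB 6"]:
--             return 0
--     for c in clb:
--         if c in ["CLB 7", "CLB 8"]:
--             return psd[1]
--     return psd[0]
-- ===== SOURCE B (Python) =====
-- def cal_olp_psd_points(psd, clb):
--     high = False
--     for c in clb:
--         if c in ("Less than CLB 4", "CLB 4 or 5", "CLB 6"):
--             return 0
--         if c in ("CLB 7", "CLB 8"):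
--             high = True
--     return psd[1] if high else psd[0]
-- ===== Notes on version B (the rewrite author's own statement) =====
-- stated objective: simpler
-- what changed: Replaces A's two separate scans of clb by a single pass that returns 0 at the first low level and carries a 'high seen' flag resolved after the loop.
import Mathlib
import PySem

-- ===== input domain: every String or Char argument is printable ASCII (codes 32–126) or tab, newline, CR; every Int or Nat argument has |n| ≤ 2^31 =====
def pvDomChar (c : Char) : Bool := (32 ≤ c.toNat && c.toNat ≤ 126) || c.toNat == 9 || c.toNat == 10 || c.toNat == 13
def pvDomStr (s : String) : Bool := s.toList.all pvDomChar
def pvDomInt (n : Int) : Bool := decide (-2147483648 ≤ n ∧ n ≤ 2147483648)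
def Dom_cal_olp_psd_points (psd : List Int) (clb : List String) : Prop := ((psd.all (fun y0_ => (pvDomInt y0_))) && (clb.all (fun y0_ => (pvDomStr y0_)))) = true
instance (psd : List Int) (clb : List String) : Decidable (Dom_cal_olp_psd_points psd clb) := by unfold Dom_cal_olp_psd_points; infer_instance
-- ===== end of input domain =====

-- B replaces A's two separate scans of clb by one pass carrying a 'high seen' flag; same return value everywhere A returns.


-- ===== PORT A =====
def pvLow (c : String) : Bool := c == "Less than CLB 4" || c == "CLB 4 or 5" || c == "CLB 6"
def pvHigh (c : String) : Bool := c == "CLB 7" || c == "CLB 8"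

-- first loop of A: returns 0 at the first low level
def pvALoop1 (psd : List Int) (clb : List String) : List String → Int
  | [] => pvALoop2 psd
  | c :: rest => if pvLow c then 0 else pvALoop1 psd clb rest
-- second loop of A: returns psd[1] at the first high level, else psd[0]
where pvALoop2 (psd : List Int) : Int :=
  if clb.any pvHigh then (PySem.List.pyGet? psd 1).getD 0 else (PySem.List.pyGet? psd 0).getD 0

def cal_olp_psd_points (psd : List Int) (clb : List String) : Int :=
  pvALoop1 psd clb clb

-- ===== PORT B =====
-- single pass: none = returned 0 at a low level; some h = finished with flag h
def pvBLoop : List String → Bool → Option Bool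
  | [], h => some h
  | c :: rest, h => if pvLow c then none else pvBLoop rest (h || pvHigh c)

def cal_olp_psd_points_alt (psd : List Int) (clb : List String) : Int :=
  match pvBLoop clb false with
  | none => 0
  | some h => (PySem.List.pyGet? psd (if h then 1 else 0)).getD 0

-- ===== PRECONDITION & SPEC =====
-- excludes exactly the inputs where A (and B) raise IndexError on psd
def Pre_cal_olp_psd_points (psd : List Int) (clb : List String) : Prop :=
  (∃ c ∈ clb, pvLow c = true) ∨
  (clb.any pvHigh = true ∧ 2 ≤ psd.length) ∨
  (clb.any pvHigh = false ∧ 1 ≤ psd.length)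
instance (psd : List Int) (clb : List String) : Decidable (Pre_cal_olp_psd_points psd clb) := by
  unfold Pre_cal_olp_psd_points; infer_instance

def pvWitness_cal_olp_psd_points : List Int × List String := ([5, 10], ["CLB 7", "CLB 9"])

def Spec_cal_olp_psd_points (psd : List Int) (clb : List String) (out : Int) : Prop := out = cal_olp_psd_points_alt psd clb
instance (psd : List Int) (clb : List String) (out : Int) : Decidable (Spec_cal_olp_psd_points psd clb out) := by unfold Spec_cal_olp_psd_points; infer_instance

-- ===== CLAIM (what is proved, stated in full; the proofs are below) =====
def Claim_equal_cal_olp_psd_points : Prop := ∀ (psd : List Int) (clb : List String), Dom_cal_olp_psd_points psd clb → Pre_cal_olp_psd_points psd clb → Spec_cal_olp_psd_points psd clb (cal_olp_psd_points psd clb)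

-- ===== LEMMAS AND PROOFS =====

-- B's loop, when no low level occurs, finishes with flag h || any high
theorem pvBLoop_no_low (clb : List String) (h : Bool)
    (hnl : ∀ c ∈ clb, pvLow c = false) :
    pvBLoop clb h = some (h || clb.any pvHigh) := by
  induction clb generalizing h with
  | nil => simp [pvBLoop]
  | cons c rest ih =>
    have hc := hnl c (List.mem_cons_self ..)
    simp [pvBLoop, hc, ih _ (fun x hx => hnl x (List.mem_cons_of_mem _ hx)),
      List.any_cons, Bool.or_assoc]

theorem pvBLoop_none_iff : ∀ (r : List String) (b b' : Bool), (pvBLoop r b = none ↔ pvBLoop r b' = none)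
  | [], b, b' => by simp [pvBLoop]
  | c :: r, b, b' => by
    by_cases hc : pvLow c = true
    · simp [pvBLoop, hc]
    · simp only [Bool.not_eq_true] at hc
      simp only [pvBLoop, hc, Bool.false_eq_true, if_false]
      exact pvBLoop_none_iff r _ _

-- A's first loop vs B's loop: the final flag only selects which psd entry is read
theorem loops_agree (psd : List Int) (clb : List String) :
    ∀ rest : List String, pvALoop1 psd clb rest =
      (match pvBLoop rest false with
       | none => 0
       | some _ =>
         if clb.any pvHigh then (PySem.List.pyGet? psd 1).getD 0
         else (PySem.List.pyGet? psd 0).getD 0) := by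
  intro rest
  induction rest with
  | nil => simp [pvALoop1, pvBLoop, pvALoop1.pvALoop2]
  | cons c r ih =>
    by_cases hc : pvLow c = true
    · simp [pvALoop1, pvBLoop, hc]
    · simp only [Bool.not_eq_true] at hc
      simp only [pvALoop1, pvBLoop, hc, Bool.false_eq_true, if_false, Bool.false_or]
      rw [ih]
      cases hm : pvBLoop r false with
      | none => rw [(pvBLoop_none_iff r (pvHigh c) false).mpr hm]
      | some h =>
        cases hm2 : pvBLoop r (pvHigh c) with
        | none => exact absurd ((pvBLoop_none_iff r (pvHigh c) false).mp hm2) (by simp [hm])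
        | some h2 => rfl

-- the key fact: A = B unconditionally (the precondition only excludes shared crashes)
theorem ports_eq (psd : List Int) (clb : List String) :
    cal_olp_psd_points psd clb = cal_olp_psd_points_alt psd clb := by
  unfold cal_olp_psd_points cal_olp_psd_points_alt
  rw [loops_agree psd clb clb]
  by_cases hl : ∀ c ∈ clb, pvLow c = false
  · rw [pvBLoop_no_low clb false hl]
    by_cases hh : clb.any pvHigh <;> simp [hh]
  · push_neg at hl
    obtain ⟨x, hx, hlx⟩ := hl
    simp only [Bool.not_eq_false] at hlx
    have : pvBLoop clb false = none := by
      induction clb with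
      | nil => simp at hx
      | cons y ys ih =>
        by_cases hy : pvLow y = true
        · simp [pvBLoop, hy]
        · simp only [Bool.not_eq_true] at hy
          rcases List.mem_cons.mp hx with rfl | hx'
          · simp [hy] at hlx
          · simp only [pvBLoop, hy, Bool.false_eq_true, if_false]
            exact (pvBLoop_none_iff ys _ false).mpr (ih hx')
    rw [this]

-- ===== VERDICT (by name: the statement is the Claim_ definition above) =====
theorem cal_olp_psd_points_spec : Claim_equal_cal_olp_psd_points := by
  intro psd clb _ _
  exact ports_eq psd clb
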